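-- pv_equiv track=rewrite | github.com/marieai/marie-ai | marie/extract/annotators/field_extractor.py | find_real_position
-- ===== SOURCE A (Python) =====
-- def find_real_position(text: str, normalized_label: str) -> int:
--     """
--     Find real position of a normalized label inside original text.
--     Used to map normalized string position back to raw index.
--     """
--     cleaned = ""
--     mapping = {}
--     j = 0
--     for i, c in enumerate(text):
--         if c not in ": \t\n\r-–—|":
--             cleaned += c.upper()
--             mapping[j] = i
--             j += 1
--
--     idx = cleaned.find(normalized_label)
--     if idx == -1:
--         return -1
--     return mapping.get(idx, -1)
-- ===== SOURCE B (Python) =====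
-- SEPARATORS = set(": \t\n\r-\u2013\u2014|")
--
--
-- def _matches_at(text, j, label):
--     """Match label chars against uppercased non-separator chars of text from j."""
--     n = len(text)
--     for ch in label:
--         while j < n and text[j] in SEPARATORS:
--             j += 1
--         if j == n or text[j].upper() != ch:
--             return False
--         j += 1
--     return True
--
--
-- def find_real_position(text: str, normalized_label: str) -> int:
--     for i in range(len(text)):
--         if text[i] in SEPARATORS:
--             continue
--         if _matches_at(text, i, normalized_label):
--             return i
--     return -1
-- ===== Notes on version B (the rewrite author's own statement) =====
-- stated objective: alternative
-- what changed: B drops A's cleaned-string and index-mapping dict entirely: it scans the raw text directly, trying each non-separator index as a match start with a two-pointer walk that skips separators and compares uppercased characters in place.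
import Mathlib
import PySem

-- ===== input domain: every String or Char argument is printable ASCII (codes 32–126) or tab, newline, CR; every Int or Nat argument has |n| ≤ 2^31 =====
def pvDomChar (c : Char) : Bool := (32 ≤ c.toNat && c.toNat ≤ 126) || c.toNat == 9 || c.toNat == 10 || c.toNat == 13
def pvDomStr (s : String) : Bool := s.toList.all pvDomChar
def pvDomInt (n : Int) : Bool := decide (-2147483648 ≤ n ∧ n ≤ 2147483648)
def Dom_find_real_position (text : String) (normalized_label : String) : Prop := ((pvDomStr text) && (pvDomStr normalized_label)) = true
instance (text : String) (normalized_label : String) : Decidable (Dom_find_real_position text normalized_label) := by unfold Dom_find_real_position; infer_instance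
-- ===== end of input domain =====

-- B replaces A's cleaned-string + index-mapping dict by a direct two-pointer scan of the
-- raw text (alternative decomposition; no speed claim).

-- ===== PORT A =====
def find_real_position (text : String) (normalized_label : String) : Int :=
  let st := (PySem.List.enumerate text.toList).foldl
    (fun (st : List Char × PySem.Dict Int Int × Int) p =>
      if (": \t\n\r-–—|".toList).contains p.2 then st
      else (st.1 ++ [PySem.Chars.upperChar p.2], st.2.1.insert st.2.2 p.1, st.2.2 + 1))
    ([], PySem.Dict.empty, 0)
  let idx := PySem.Chars.find st.1 normalized_label.toList
  if idx = -1 then -1 else st.2.1.getD idx (-1)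

-- ===== PORT B =====
def pvSepB (c : Char) : Bool := (": \t\n\r-–—|".toList).contains c

-- _matches_at from Source B: walk the text skipping separators while consuming label chars
def pvMatchesAt (txt : List Char) (lbl : List Char) : Bool :=
  match txt, lbl with
  | _, [] => true
  | [], _ :: _ => false
  | c :: cs, l :: ls =>
    if pvSepB c then pvMatchesAt cs (l :: ls)
    else (PySem.Chars.upperChar c == l) && pvMatchesAt cs ls

-- the outer 'for i in range(len(text))' loop of Source B
def pvScan (txt : List Char) (lbl : List Char) (i : Int) : Int :=
  match txt with
  | [] => -1
  | c :: cs => if !pvSepB c && pvMatchesAt (c :: cs) lbl then i else pvScan cs lbl (i + 1)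

def find_real_position_alt (text : String) (normalized_label : String) : Int :=
  pvScan text.toList normalized_label.toList 0

-- ===== PRECONDITION & SPEC =====
def Spec_find_real_position (text : String) (normalized_label : String) (out : Int) : Prop := out = find_real_position_alt text normalized_label
instance (text : String) (normalized_label : String) (out : Int) : Decidable (Spec_find_real_position text normalized_label out) := by unfold Spec_find_real_position; infer_instance

-- ===== CLAIM (what is proved, stated in full; the proofs are below) =====
def Claim_equal_find_real_position : Prop := ∀ (text : String) (normalized_label : String), Dom_find_real_position text normalized_label → Spec_find_real_position text normalized_label (find_real_position text normalized_label)

-- ===== LEMMAS AND PROOFS =====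

-- kept (index, char) pairs of an enumerated text
def keptP (ps : List (Int × Char)) : List (Int × Char) := ps.filter (fun p => !pvSepB p.2)

-- common specification: first kept original index whose uppercased kept suffix starts with lbl
def pvSpec (lbl : List Char) : List (Int × Char) → Int
  | [] => -1
  | p :: K =>
    if lbl <+: ((p :: K).map (fun q => PySem.Chars.upperChar q.2)) then p.1
    else pvSpec lbl K

theorem pvMatchesAt_iff (txt : List Char) (lbl : List Char) :
    pvMatchesAt txt lbl = true ↔
      lbl <+: (txt.filter (fun c => !pvSepB c)).map PySem.Chars.upperChar := by
  induction txt generalizing lbl with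
  | nil =>
    cases lbl with
    | nil => simp [pvMatchesAt]
    | cons l ls => simp [pvMatchesAt]
  | cons c cs ih =>
    cases lbl with
    | nil => simp [pvMatchesAt]
    | cons l ls =>
      by_cases hs : pvSepB c
      · simp [pvMatchesAt, hs, ih]
      · have hs' : pvSepB c = false := by simpa using hs
        rw [show pvMatchesAt (c :: cs) (l :: ls)
              = ((PySem.Chars.upperChar c == l) && pvMatchesAt cs ls) from by
            simp [pvMatchesAt, hs']]
        rw [show List.filter (fun c => !pvSepB c) (c :: cs)
              = c :: List.filter (fun c => !pvSepB c) cs from by simp [hs']]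
        rw [List.map_cons, List.cons_prefix_cons]
        simp only [Bool.and_eq_true, beq_iff_eq, ih]
        exact and_congr_left (fun _ => eq_comm)

theorem keptP_map_upper (t : List Char) (s : Int) :
    (keptP (PySem.List.enumerate t s)).map (fun q => PySem.Chars.upperChar q.2)
      = (t.filter (fun c => !pvSepB c)).map PySem.Chars.upperChar := by
  induction t generalizing s with
  | nil => simp [keptP, PySem.List.enumerate_nil]
  | cons c cs ih =>
    by_cases hs : pvSepB c
    · have := ih (s + 1)
      simp only [keptP, PySem.List.enumerate_cons, List.filter_cons, hs, Bool.not_true,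
        Bool.false_eq_true, if_false, List.filter] at this ⊢
      simpa [keptP, hs] using this
    · have := ih (s + 1)
      simpa [keptP, PySem.List.enumerate_cons, hs] using this

theorem pvScan_eq_spec (txt : List Char) (lbl : List Char) (i : Int) :
    pvScan txt lbl i = pvSpec lbl (keptP (PySem.List.enumerate txt i)) := by
  induction txt generalizing i with
  | nil => simp [pvScan, keptP, PySem.List.enumerate_nil, pvSpec]
  | cons c cs ih =>
    by_cases hs : pvSepB c
    · simp [pvScan, hs, keptP, PySem.List.enumerate_cons]
      simpa [keptP] using ih (i + 1)
    · have hK : keptP (PySem.List.enumerate (c :: cs) i)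
          = (i, c) :: keptP (PySem.List.enumerate cs (i + 1)) := by
        simp [keptP, PySem.List.enumerate_cons, hs]
      by_cases hm : pvMatchesAt (c :: cs) lbl = true
      · have hpre := (pvMatchesAt_iff (c :: cs) lbl).1 hm
        rw [hK]
        have hs' : pvSepB c = false := by simpa using hs
        simp only [pvScan, hs', hm, Bool.not_false, Bool.true_and, if_true]
        have hthis : lbl <+: (((i, c) :: keptP (PySem.List.enumerate cs (i + 1))).map
            (fun q => PySem.Chars.upperChar q.2)) := by
          have hmap := keptP_map_upper (c :: cs) i
          rw [hK] at hmap
          rw [hmap]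
          simpa [hs'] using hpre
        rw [pvSpec, if_pos hthis]
      · have hpre : ¬ lbl <+: (((i, c) :: keptP (PySem.List.enumerate cs (i + 1))).map
            (fun q => PySem.Chars.upperChar q.2)) := by
          have hmap := keptP_map_upper (c :: cs) i
          rw [hK] at hmap
          rw [hmap]
          intro h
          exact hm ((pvMatchesAt_iff (c :: cs) lbl).2 (by simpa [hs] using h))
        have hm' : pvMatchesAt (c :: cs) lbl = false := by simpa using hm
        rw [hK]
        simp only [pvScan, hm', Bool.and_false, Bool.false_eq_true, if_false]
        rw [pvSpec, if_neg hpre]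
        exact ih (i + 1)

-- find points at the unique minimal prefix position
theorem find_eq_of (s sub : List Char) (n : Nat)
    (h1 : sub <+: s.drop n) (h2 : ∀ m < n, ¬ sub <+: s.drop m) :
    PySem.Chars.find s sub = (n : Int) := by
  have hin : PySem.Chars.isIn sub s = true :=
    (PySem.Chars.exists_prefix_drop_iff_isIn sub s).1 ⟨n, h1⟩
  have hinf : sub <:+: s := (PySem.Chars.isIn_iff_infix sub s).1 hin
  have hnn : 0 ≤ PySem.Chars.find s sub := (PySem.Chars.find_nonneg_iff s sub).2 hinf
  obtain ⟨hp, hmin⟩ := PySem.Chars.find_spec hnn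
  have : (PySem.Chars.find s sub).toNat = n := by
    rcases lt_trichotomy (PySem.Chars.find s sub).toNat n with h | h | h
    · exact absurd hp (h2 _ h)
    · exact h
    · exact absurd h1 (hmin n h)
  omega

theorem find_cons_of_not_prefix (u : Char) (s' sub : List Char)
    (h : ¬ sub <+: (u :: s')) :
    PySem.Chars.find (u :: s') sub =
      (if PySem.Chars.find s' sub = -1 then -1 else PySem.Chars.find s' sub + 1) := by
  by_cases hin : sub <:+: (u :: s')
  · have hnn : 0 ≤ PySem.Chars.find (u :: s') sub := (PySem.Chars.find_nonneg_iff (u :: s') sub).2 hin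
    obtain ⟨hp, hmin⟩ := PySem.Chars.find_spec hnn
    set n := (PySem.Chars.find (u :: s') sub).toNat with hn
    have hn0 : n ≠ 0 := by
      intro h0
      exact h (by simpa [h0] using hp)
    have hp' : sub <+: s'.drop (n - 1) := by
      obtain ⟨k, hk2⟩ := Nat.exists_eq_succ_of_ne_zero hn0
      have hd : (u :: s').drop n = s'.drop (n - 1) := by
        rw [hk2]
        simp
      rwa [hd] at hp
    have hmin' : ∀ m < n - 1, ¬ sub <+: s'.drop m := by
      intro m hm hpre
      exact hmin (m + 1) (by omega) (by simpa using hpre)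
    have hfind' : PySem.Chars.find s' sub = ((n - 1 : Nat) : Int) :=
      find_eq_of s' sub (n - 1) hp' hmin'
    have hne : PySem.Chars.find s' sub ≠ -1 := by rw [hfind']; omega
    rw [if_neg hne, hfind']
    have hfn : PySem.Chars.find (u :: s') sub = (n : Int) := by omega
    rw [hfn]
    omega
  · have h1 : PySem.Chars.find (u :: s') sub = -1 := (PySem.Chars.find_eq_neg_one_iff (u :: s') sub).2 hin
    have h2 : PySem.Chars.find s' sub = -1 := by
      refine (PySem.Chars.find_eq_neg_one_iff s' sub).2 ?_
      intro hinf'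
      exact hin (List.infix_cons hinf')
    rw [h1, h2, if_pos rfl]

theorem pvSpec_eq_find (lbl : List Char) (K : List (Int × Char)) :
    pvSpec lbl K =
      (if PySem.Chars.find (K.map (fun q => PySem.Chars.upperChar q.2)) lbl = -1 then -1
       else if 0 ≤ PySem.Chars.find (K.map (fun q => PySem.Chars.upperChar q.2)) lbl ∧
               PySem.Chars.find (K.map (fun q => PySem.Chars.upperChar q.2)) lbl < (K.length : Int)
       then (K.map Prod.fst).getD
              (PySem.Chars.find (K.map (fun q => PySem.Chars.upperChar q.2)) lbl).toNat (-1)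
       else -1) := by
  induction K with
  | nil =>
    by_cases hl : lbl = []
    · subst hl
      simp [pvSpec, PySem.Chars.find_nil]
    · have hmiss : PySem.Chars.find ([] : List Char) lbl = -1 := by
        refine (PySem.Chars.find_eq_neg_one_iff [] lbl).2 ?_
        simpa [List.infix_nil] using hl
      simp [pvSpec, hmiss]
  | cons p K' ih =>
    set cl' := K'.map (fun q => PySem.Chars.upperChar q.2) with hcl'
    have hmapc : (p :: K').map (fun q => PySem.Chars.upperChar q.2)
        = PySem.Chars.upperChar p.2 :: cl' := by simp [hcl']
    by_cases hpre : lbl <+: (PySem.Chars.upperChar p.2 :: cl')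
    · have hfind : PySem.Chars.find (PySem.Chars.upperChar p.2 :: cl') lbl = (0 : Int) :=
        find_eq_of _ _ 0 (by simpa using hpre) (by omega)
      rw [pvSpec, if_pos (by rw [hmapc]; exact hpre), hmapc, hfind]
      rw [if_neg (by omega),
        if_pos ⟨le_refl (0 : Int), by exact_mod_cast Nat.succ_pos K'.length⟩]
      simp
    · have hfind := find_cons_of_not_prefix (PySem.Chars.upperChar p.2) cl' lbl hpre
      rw [pvSpec, if_neg (by rw [hmapc]; exact hpre), hmapc, hfind, ih]
      by_cases hmiss : PySem.Chars.find cl' lbl = -1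
      · rw [if_pos hmiss, if_pos hmiss, if_pos rfl]
      · have hnn : 0 ≤ PySem.Chars.find cl' lbl := by
          have := PySem.Chars.neg_one_le_find cl' lbl
          omega
        have hlblne : lbl ≠ [] := by
          intro h
          exact hpre (by simp [h])
        have hlt : PySem.Chars.find cl' lbl < (K'.length : Int) := by
          obtain ⟨hp, -⟩ := PySem.Chars.find_spec hnn
          have hlen := PySem.Chars.find_le_length cl' lbl
          rcases lt_or_eq_of_le hlen with h | h
          · simpa [hcl'] using h
          · exfalso
            have hdrop : cl'.drop (PySem.Chars.find cl' lbl).toNat = [] := by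
              apply List.drop_eq_nil_of_le
              omega
            rw [hdrop] at hp
            exact hlblne (List.prefix_nil.mp hp)
        have hne2 : ¬ (PySem.Chars.find cl' lbl + 1 = -1) := by omega
        have hlen : ((p :: K').length : Int) = (K'.length : Int) + 1 := by
          push_cast [List.length_cons]
          ring
        have htn : (PySem.Chars.find cl' lbl + 1).toNat
            = (PySem.Chars.find cl' lbl).toNat + 1 := by omega
        simp only [if_neg hmiss, if_neg hne2]
        rw [if_pos ⟨hnn, hlt⟩, if_pos ⟨by omega, by rw [hlen]; omega⟩, htn,
          List.map_cons, List.getD_cons_succ]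

-- characterisation of A's building loop
theorem foldA_char (ps : List (Int × Char)) (cl : List Char) (m : PySem.Dict Int Int) (j : Int) :
    (ps.foldl
      (fun (st : List Char × PySem.Dict Int Int × Int) p =>
        if (": \t\n\r-–—|".toList).contains p.2 then st
        else (st.1 ++ [PySem.Chars.upperChar p.2], st.2.1.insert st.2.2 p.1, st.2.2 + 1))
      (cl, m, j)).1 = cl ++ (keptP ps).map (fun q => PySem.Chars.upperChar q.2)
    ∧ ∀ k d,
      ((ps.foldl
        (fun (st : List Char × PySem.Dict Int Int × Int) p =>
          if (": \t\n\r-–—|".toList).contains p.2 then st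
          else (st.1 ++ [PySem.Chars.upperChar p.2], st.2.1.insert st.2.2 p.1, st.2.2 + 1))
        (cl, m, j)).2.1).getD k d =
        if j ≤ k ∧ k < j + ((keptP ps).length : Int)
        then ((keptP ps).map Prod.fst).getD (k - j).toNat d
        else m.getD k d := by
  induction ps generalizing cl m j with
  | nil =>
    constructor
    · simp [keptP]
    · intro k d
      rw [List.foldl_nil,
        if_neg (by simp only [keptP, List.filter_nil, List.length_nil]; push_cast; omega)]
  | cons p ps' ih =>
    by_cases hs : pvSepB p.2 = true
    · have hk : keptP (p :: ps') = keptP ps' := by simp [keptP, hs]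
      obtain ⟨i1, i2⟩ := ih cl m j
      refine ⟨?_, ?_⟩
      · rw [List.foldl_cons, if_pos (show (": \t\n\r-–—|".toList).contains p.2 = true from hs), hk]
        exact i1
      · intro k d
        rw [List.foldl_cons, if_pos (show (": \t\n\r-–—|".toList).contains p.2 = true from hs), hk]
        exact i2 k d
    · have hsB : pvSepB p.2 = false := by
        cases h : pvSepB p.2
        · rfl
        · exact absurd h hs
      have hk : keptP (p :: ps') = p :: keptP ps' := by simp [keptP, hsB]
      obtain ⟨ih1, ih2⟩ := ih (cl ++ [PySem.Chars.upperChar p.2]) (m.insert j p.1) (j + 1)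
      constructor
      · rw [List.foldl_cons,
          if_neg (show ¬ ((": \t\n\r-–—|".toList).contains p.2 = true) from hs), hk, ih1]
        simp
      · intro k d
        rw [List.foldl_cons,
          if_neg (show ¬ ((": \t\n\r-–—|".toList).contains p.2 = true) from hs), hk]
        rw [ih2 k d]
        by_cases hkj : k = j
        · subst hkj
          rw [if_neg (by omega), if_pos (by push_cast [List.length_cons]; omega)]
          rw [PySem.Dict.getD_insert_self]
          simp
        · by_cases hge : j + 1 ≤ k ∧ k < j + 1 + ((keptP ps').length : Int)
          · rw [if_pos hge, if_pos (by push_cast [List.length_cons]; omega)]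
            have : (k - j).toNat = (k - (j + 1)).toNat + 1 := by omega
            simp [this]
          · rw [if_neg hge, if_neg (by push_cast [List.length_cons]; omega)]
            rw [PySem.Dict.getD_insert, if_neg hkj]

-- ===== VERDICT (by name: the statement is the Claim_ definition above) =====
theorem find_real_position_spec : Claim_equal_find_real_position := by
  intro text nl _
  unfold Spec_find_real_position find_real_position find_real_position_alt
  obtain ⟨h1, h2⟩ := foldA_char (PySem.List.enumerate text.toList) [] PySem.Dict.empty 0
  rw [pvScan_eq_spec, pvSpec_eq_find]
  simp only [h1, List.nil_append]
  rw [keptP_map_upper]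
  set K := keptP (PySem.List.enumerate text.toList) with hK
  set idx := PySem.Chars.find ((text.toList.filter (fun c => !pvSepB c)).map PySem.Chars.upperChar) nl.toList with hidx
  by_cases hm : idx = -1
  · simp [hm]
  · rw [if_neg hm, if_neg hm, h2 idx (-1)]
    by_cases hrange : (0 : Int) ≤ idx ∧ idx < 0 + (K.length : Int)
    · rw [if_pos hrange, if_pos (by omega)]
      simp
    · rw [if_neg hrange, if_neg (by omega)]
      simp [PySem.Dict.getD_empty]
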